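-- pv_equiv track=rewrite | github.com/dwgx/vrchat-il2cpp-re | tools/reverse_struct_layout.py | looks_like_namespace
-- ===== SOURCE A (Python) =====
-- def is_ascii_printable(text: str) -> bool:
--     return bool(text) and all(32 <= ord(ch) < 127 for ch in text)
--
-- def looks_like_namespace(text: str | None) -> bool:
--     if text is None:
--         return False
--     if text == "":
--         return True
--     if not is_ascii_printable(text):
--         return False
--     return all(ch.isalnum() or ch in "._+" for ch in text)
-- ===== SOURCE B (Python) =====
-- _ALLOWED = frozenset(
--     "ABCDEFGHIJKLMNOPQRSTUVWXYZabcdefghijklmnopqrstuvwxyz0123456789._+"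
-- )
--
-- def looks_like_namespace(text):
--     if text is None:
--         return False
--     return set(text) <= _ALLOWED
-- ===== Notes on version B (the rewrite author's own statement) =====
-- stated objective: simpler
-- what changed: Replaces the empty-string special case plus two character scans (ASCII-printable gate, then isalnum-or-punctuation) with a single set-subset test of the string's distinct characters against one precomputed frozenset of ASCII letters, digits, dot, underscore and plus.
import Mathlib
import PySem

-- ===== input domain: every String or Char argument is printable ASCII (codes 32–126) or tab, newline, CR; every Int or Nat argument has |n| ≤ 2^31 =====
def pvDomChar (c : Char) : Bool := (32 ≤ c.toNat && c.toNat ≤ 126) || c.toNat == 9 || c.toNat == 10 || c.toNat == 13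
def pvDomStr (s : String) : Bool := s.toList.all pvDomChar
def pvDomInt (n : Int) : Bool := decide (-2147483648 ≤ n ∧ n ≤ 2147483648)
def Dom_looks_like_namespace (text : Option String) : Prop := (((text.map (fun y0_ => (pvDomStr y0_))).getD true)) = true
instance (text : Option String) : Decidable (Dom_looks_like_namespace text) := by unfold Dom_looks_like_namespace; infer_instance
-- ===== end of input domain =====

-- B replaces A's empty-string special case and two character scans by one set-subset
-- test against a precomputed allowed-character set (objective: simpler).

-- ===== PORT A =====
-- bool(text) and all(32 <= ord(ch) < 127 for ch in text); strings handled on .toList per PySem convention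
def is_ascii_printable (s : String) : Bool :=
  (!s.toList.isEmpty) && s.toList.all (fun ch => decide (32 ≤ ch.toNat) && decide (ch.toNat < 127))

def looks_like_namespace (text : Option String) : Bool :=
  match text with
  | none => false
  | some t =>
    if t.toList.isEmpty then true            -- text == ""
    else if !(is_ascii_printable t) then false
    else t.toList.all (fun ch => PySem.Chars.isalnum ch || ['.', '_', '+'].contains ch)  -- ch in "._+"

-- ===== PORT B =====
-- the frozenset literal _ALLOWED (distinct characters of the literal string)
def nsAllowed : List Char :=
  ['A','B','C','D','E','F','G','H','I','J','K','L','M','N','O','P','Q','R','S','T','U','V','W','X','Y','Z',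
   'a','b','c','d','e','f','g','h','i','j','k','l','m','n','o','p','q','r','s','t','u','v','w','x','y','z',
   '0','1','2','3','4','5','6','7','8','9','.','_','+']

def looks_like_namespace_alt (text : Option String) : Bool :=
  match text with
  | none => false
  | some t => (PySem.Set.ofList t.toList).all (fun c => nsAllowed.contains c)  -- set(text) <= _ALLOWED

-- ===== PRECONDITION & SPEC =====
def Spec_looks_like_namespace (text : Option String) (out : Bool) : Prop := out = looks_like_namespace_alt text
instance (text : Option String) (out : Bool) : Decidable (Spec_looks_like_namespace text out) := by unfold Spec_looks_like_namespace; infer_instance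

-- ===== CLAIM (what is proved, stated in full; the proofs are below) =====
def Claim_equal_looks_like_namespace : Prop := ∀ (text : Option String), Dom_looks_like_namespace text → Spec_looks_like_namespace text (looks_like_namespace text)

-- ===== LEMMAS AND PROOFS =====

lemma char_le_iff (a b : Char) : (a ≤ b) ↔ a.toNat ≤ b.toNat := UInt32.le_iff_toNat_le

lemma char_eq_iff (a b : Char) : (a = b) ↔ a.toNat = b.toNat := by
  rw [Char.ext_iff, ← UInt32.toNat_inj]; rfl

lemma if_not_then_false (b x : Bool) : (if (!b) = true then false else x) = (b && x) := by
  cases b <;> simp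

-- A's per-character test equals membership in B's allowed set
lemma char_bridge (c : Char) :
    ((decide (32 ≤ c.toNat) && decide (c.toNat < 127)) &&
      (PySem.Chars.isalnum c || ['.', '_', '+'].contains c))
    = nsAllowed.contains c := by
  rw [Bool.eq_iff_iff]
  simp [PySem.Chars.isalnum, PySem.Chars.isalpha, PySem.Chars.isdigit,
    PySem.Chars.isupper, PySem.Chars.islower, nsAllowed, List.contains_eq_mem,
    char_le_iff, char_eq_iff]
  omega

-- all over the deduplicated set equals all over the underlying list
lemma set_ofList_all (l : List Char) (f : Char → Bool) :
    (PySem.Set.ofList l).all f = l.all f := by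
  rw [Bool.eq_iff_iff]
  simp only [List.all_eq_true]
  constructor
  · intro h x hx; exact h x ((PySem.Set.mem_ofList l x).mpr hx)
  · intro h x hx; exact h x ((PySem.Set.mem_ofList l x).mp hx)

-- ===== VERDICT (by name: the statement is the Claim_ definition above) =====
theorem looks_like_namespace_spec : Claim_equal_looks_like_namespace := by
  intro text hdom
  unfold Spec_looks_like_namespace
  cases text with
  | none => rfl
  | some t =>
    simp only [Dom_looks_like_namespace, Option.map_some, Option.getD_some, pvDomStr] at hdom
    simp only [looks_like_namespace, looks_like_namespace_alt, is_ascii_printable,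
      set_ofList_all]
    by_cases he : t.toList.isEmpty
    · have h0 : t.toList = [] := by simpa using he
      simp [h0]
    · rw [if_neg (by simp [he])]
      simp only [he, Bool.not_false, Bool.true_and]
      rw [if_not_then_false]
      rw [Bool.eq_iff_iff]
      constructor
      · intro hpq
        rcases (Bool.and_eq_true ..).mp hpq with ⟨hp, hq⟩
        rw [List.all_eq_true] at hp hq
        rw [List.all_eq_true]
        intro x hx
        rw [← char_bridge x, Bool.and_eq_true]
        exact ⟨hp x hx, hq x hx⟩
      · intro h
        rw [List.all_eq_true] at h
        rw [Bool.and_eq_true, List.all_eq_true, List.all_eq_true]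
        refine ⟨fun x hx => ?_, fun x hx => ?_⟩ <;>
          ( have hb := h x hx
            rw [← char_bridge x, Bool.and_eq_true] at hb )
        · exact hb.1
        · exact hb.2
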